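-- pv_equiv track=rewrite | github.com/zc-public/breakme-resources | cards/ulc/analyses/fingerprint.py | repr_range
-- ===== SOURCE A (Python) =====
-- def repr_range(vals):
--     s = ""
--     if len(vals) > 0:
--         prev = None
--         rang = False
--         for i in vals:
--             if prev is None:
--                 s += f"{i:02x}"
--                 prev = i
--             else:
--                 if i == prev + 1:
--                     if rang is False:
--                         s += "-"
--                         rang = True
--                     prev = i
--                 else:
--                     if rang is True:
--                         s += f"{prev:02x},{i:02x}"
--                     else:
--                         s += f",{i:02x}"
--                     prev = i
--                     rang = False
--         if rang is True:
--             s += f"{prev:02x}"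
--     return s
-- ===== SOURCE B (Python) =====
-- def repr_range(vals):
--     # Partition vals into maximal runs of consecutive integers, then format each run.
--     runs = []
--     cur = None
--     for v in vals:
--         if cur is not None and v == cur[1] + 1:
--             cur = (cur[0], v)
--         else:
--             if cur is not None:
--                 runs.append(cur)
--             cur = (v, v)
--     if cur is not None:
--         runs.append(cur)
--     return ",".join(
--         f"{s:02x}" if e == s else f"{s:02x}-{e:02x}" for s, e in runs
--     )
-- ===== Notes on version B (the rewrite author's own statement) =====
-- stated objective: simpler
-- what changed: Replaces A's single-pass prev/rang flag state machine that emits string fragments mid-loop with a two-phase decomposition: one pass partitioning the input into maximal consecutive runs as (start,end) pairs, then a formatting pass joining per-run tokens with ','.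
import Mathlib
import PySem

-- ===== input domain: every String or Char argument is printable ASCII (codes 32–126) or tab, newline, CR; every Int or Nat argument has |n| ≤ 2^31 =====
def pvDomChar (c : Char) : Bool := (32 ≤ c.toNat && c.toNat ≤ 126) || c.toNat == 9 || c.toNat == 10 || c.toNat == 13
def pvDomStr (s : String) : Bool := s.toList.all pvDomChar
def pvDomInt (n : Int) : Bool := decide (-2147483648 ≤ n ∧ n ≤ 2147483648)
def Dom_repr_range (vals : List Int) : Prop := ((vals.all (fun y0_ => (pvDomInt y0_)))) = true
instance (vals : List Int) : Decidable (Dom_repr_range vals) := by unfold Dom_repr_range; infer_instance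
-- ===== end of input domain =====

-- B replaces A's prev/rang flag state machine by an explicit runs pass plus a formatting pass (objective: simpler decomposition, same O(n) cost).

-- f"{i:02x}": lowercase hex of |i|, '-' in front for negatives, zero-padded to width 2 with the
-- sign staying in front (hand-ported, exact: padding via PySem.Str.zfill which is exact).
def hex02 (i : Int) : String :=
  PySem.Str.zfill (String.ofList ((if i < 0 then ['-'] else []) ++ Nat.toDigits 16 i.natAbs)) 2

-- ===== PORT A =====
-- the loop of A, over state (s, prev, rang); at the end the `if rang is True` append
def reprALoop : List Int → String → Option Int → Bool → String
  | [], s, prev, rang => if rang then s ++ (prev.elim "" hex02) else s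
  | i :: rest, s, prev, rang =>
    match prev with
    | none => reprALoop rest (s ++ hex02 i) (some i) false
    | some p =>
      if i = p + 1 then
        if rang = false then reprALoop rest (s ++ "-") (some i) true
        else reprALoop rest s (some i) true
      else
        if rang = true then reprALoop rest (s ++ hex02 p ++ "," ++ hex02 i) (some i) false
        else reprALoop rest (s ++ "," ++ hex02 i) (some i) false

def repr_range (vals : List Int) : String := reprALoop vals "" none false

-- ===== PORT B =====
-- first pass: partition vals into maximal runs of consecutive integers, as (start, end) pairs
def runsStep (st : List (Int × Int) × Option (Int × Int)) (v : Int) : List (Int × Int) × Option (Int × Int) :=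
  match st.2 with
  | some (a, e) => if v = e + 1 then (st.1, some (a, v)) else (st.1 ++ [(a, e)], some (v, v))
  | none => (st.1, some (v, v))

def runsOf (vals : List Int) : List (Int × Int) :=
  match vals.foldl runsStep ([], none) with
  | (rs, some cur) => rs ++ [cur]
  | (rs, none) => rs

-- second pass: format one run
def runToken (r : Int × Int) : String :=
  if r.2 = r.1 then hex02 r.1 else hex02 r.1 ++ "-" ++ hex02 r.2

def repr_range_alt (vals : List Int) : String :=
  PySem.Str.join "," ((runsOf vals).map runToken)

-- ===== PRECONDITION & SPEC =====
def Spec_repr_range (vals : List Int) (out : String) : Prop := out = repr_range_alt vals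
instance (vals : List Int) (out : String) : Decidable (Spec_repr_range vals out) := by unfold Spec_repr_range; infer_instance

-- ===== CLAIM (what is proved, stated in full; the proofs are below) =====
def Claim_equal_repr_range : Prop := ∀ (vals : List Int), Dom_repr_range vals → Spec_repr_range vals (repr_range vals)

-- ===== LEMMAS AND PROOFS =====

-- recursive run builder used only by the proofs, equal to runsOf's foldl
def runsGo (a e : Int) : List Int → List (Int × Int)
  | [] => [(a, e)]
  | y :: ys => if y = e + 1 then runsGo a y ys else (a, e) :: runsGo y y ys

-- ","-prefixed join of tokens, used only by the proofs
def joinC : List String → String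
  | [] => ""
  | p :: rest => "," ++ p ++ joinC rest

theorem runsGo_ext (a e : Int) (ys : List Int) :
    runsGo a e ((e + 1) :: ys) = runsGo a (e + 1) ys := by simp [runsGo]

theorem runsGo_close (a e y : Int) (ys : List Int) (h : ¬ y = e + 1) :
    runsGo a e (y :: ys) = (a, e) :: runsGo y y ys := by simp [runsGo, h]

theorem loopA_ext (p : Int) (ys : List Int) (s : String) :
    reprALoop ((p + 1) :: ys) s (some p) false = reprALoop ys (s ++ "-") (some (p + 1)) true := by
  simp [reprALoop]

theorem loopA_ext_t (p : Int) (ys : List Int) (s : String) :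
    reprALoop ((p + 1) :: ys) s (some p) true = reprALoop ys s (some (p + 1)) true := by
  simp [reprALoop]

theorem loopA_close (p y : Int) (ys : List Int) (s : String) (h : ¬ y = p + 1) :
    reprALoop (y :: ys) s (some p) false = reprALoop ys (s ++ "," ++ hex02 y) (some y) false := by
  simp [reprALoop, h]

theorem loopA_close_t (p y : Int) (ys : List Int) (s : String) (h : ¬ y = p + 1) :
    reprALoop (y :: ys) s (some p) true
      = reprALoop ys (s ++ hex02 p ++ "," ++ hex02 y) (some y) false := by
  simp [reprALoop, h]

theorem runsGo_foldl (l : List Int) (rs : List (Int × Int)) (a e : Int) :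
    (match l.foldl runsStep (rs, some (a, e)) with
      | (rs', some cur) => rs' ++ [cur]
      | (rs', none) => rs') = rs ++ runsGo a e l := by
  induction l generalizing rs a e with
  | nil => simp [runsGo]
  | cons y ys ih =>
    by_cases h : y = e + 1 <;>
      simp [List.foldl_cons, runsStep, h, runsGo, ih]

theorem runsOf_eq_runsGo (x : Int) (xs : List Int) : runsOf (x :: xs) = runsGo x x xs := by
  have := runsGo_foldl xs [] x x
  simpa [runsOf, List.foldl_cons, runsStep] using this

theorem join_cons (a : String) (l : List String) :
    PySem.Str.join "," (a :: l) = a ++ joinC l := by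
  induction l generalizing a with
  | nil => simp [PySem.Str.join, PySem.Chars.join_singleton, joinC]
  | cons b bs ih =>
    have hb := ih b
    simp only [PySem.Str.join, List.map_cons] at hb ⊢
    rw [PySem.Chars.join_cons_cons]
    simp only [joinC]
    rw [String.ofList_append, String.ofList_append, hb]
    simp [String.append_assoc]

theorem joinC_cons_join (r : Int × Int) (rl : List (Int × Int)) :
    joinC ((r :: rl).map runToken) = "," ++ PySem.Str.join "," ((r :: rl).map runToken) := by
  rw [List.map_cons, join_cons, joinC]
  simp [String.append_assoc]

theorem runsGo_shape (l : List Int) (a e : Int) :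
    ∃ e' more, runsGo a e l = (a, e') :: more ∧ e ≤ e' := by
  induction l generalizing a e with
  | nil => exact ⟨e, [], rfl, le_refl e⟩
  | cons y ys ih =>
    by_cases h : y = e + 1
    · subst h
      obtain ⟨e', more, hgo, hle⟩ := ih a (e + 1)
      exact ⟨e', more, by rw [runsGo_ext, hgo], by omega⟩
    · exact ⟨e, runsGo y y ys, runsGo_close a e y ys h, le_refl e⟩

-- tail string of a run list whose head's token was already partially emitted
def endStr : List (Int × Int) → String
  | [] => ""
  | (_, e) :: more => hex02 e ++ joinC (more.map runToken)

theorem reprALoop_append (l : List Int) (a s : String) (p : Option Int) (r : Bool) :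
    reprALoop l (a ++ s) p r = a ++ reprALoop l s p r := by
  induction l generalizing s p r with
  | nil => cases r <;> simp [reprALoop, String.append_assoc]
  | cons y ys ih =>
    match p with
    | none => simpa [reprALoop, String.append_assoc] using ih (s ++ hex02 y) (some y) false
    | some q =>
      by_cases h : y = q + 1
      · cases r <;> simp [reprALoop, h, String.append_assoc, ih]
      · cases r <;> simp [reprALoop, h, String.append_assoc, ih]

theorem reprALoop_run (l : List Int) (s : String) (p : Option Int) (r : Bool) :
    reprALoop l s p r = s ++ reprALoop l "" p r := by
  simpa using reprALoop_append l s "" p r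

-- the main invariant: both loop states of A, characterised through runsGo
theorem main_inv (rest : List Int) :
    (∀ p, PySem.Str.join "," ((runsGo p p rest).map runToken)
            = hex02 p ++ reprALoop rest "" (some p) false)
    ∧ (∀ a p, endStr (runsGo a p rest) = reprALoop rest "" (some p) true) := by
  induction rest with
  | nil =>
    constructor
    · intro p
      simp [runsGo, join_cons, joinC, runToken, reprALoop]
    · intro a p
      simp [runsGo, endStr, joinC, reprALoop]
  | cons y ys ih =>
    obtain ⟨ihf, iht⟩ := ih
    constructor
    · intro p
      by_cases h : y = p + 1
      · -- run extends: A prints "-" and switches to rang = true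
        subst h
        obtain ⟨e', more, hgo, hle⟩ := runsGo_shape ys p (p + 1)
        have hne : e' ≠ p := by omega
        have ht := iht p (p + 1)
        rw [hgo] at ht
        rw [runsGo_ext, hgo, List.map_cons, join_cons, loopA_ext,
          reprALoop_run ys ("" ++ "-"), ← ht, endStr, runToken]
        simp [hne, String.append_assoc]
      · -- run closes: new run starts at y
        obtain ⟨e', more, hgo, _⟩ := runsGo_shape ys y y
        rw [runsGo_close p p y ys h, List.map_cons, join_cons,
          show joinC ((runsGo y y ys).map runToken)
              = "," ++ PySem.Str.join "," ((runsGo y y ys).map runToken) from by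
            rw [hgo]; exact joinC_cons_join _ _,
          ihf y, loopA_close p y ys "" h, reprALoop_run ys ("" ++ "," ++ hex02 y)]
        simp [runToken, String.append_assoc]
    · intro a p
      by_cases h : y = p + 1
      · subst h
        rw [runsGo_ext, loopA_ext_t]
        exact iht a (p + 1)
      · obtain ⟨e', more, hgo, _⟩ := runsGo_shape ys y y
        rw [runsGo_close a p y ys h, endStr,
          show joinC ((runsGo y y ys).map runToken)
              = "," ++ PySem.Str.join "," ((runsGo y y ys).map runToken) from by
            rw [hgo]; exact joinC_cons_join _ _,
          ihf y, loopA_close_t p y ys "" h, reprALoop_run ys ("" ++ hex02 p ++ "," ++ hex02 y)]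
        simp [String.append_assoc]

-- ===== VERDICT (by name: the statement is the Claim_ definition above) =====
theorem repr_range_spec : Claim_equal_repr_range := by
  intro vals _
  unfold Spec_repr_range
  match vals with
  | [] => rfl
  | x :: xs =>
    have hf := (main_inv xs).1 x
    rw [repr_range_alt, runsOf_eq_runsGo, repr_range]
    show reprALoop xs ("" ++ hex02 x) (some x) false = _
    rw [reprALoop_run xs ("" ++ hex02 x), hf]
    simp
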